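-- pv_equiv track=rewrite | github.com/petertbernhardt/dataStructures | maps/__init__.py | containsThree
-- ===== SOURCE A (Python) =====
-- def containsThree(stringList):
--     dictionary = dict()
--     for string in stringList:
--         if string in dictionary:
--             dictionary[string] = dictionary.get(string) + 1
--         else:
--             # String isn't in the dictionary, add it
--             dictionary[string] = 1
--     for string in dictionary.keys():
--         if dictionary[string] >= 3:
--             return True
--     return False
-- ===== SOURCE B (Python) =====
-- def containsThree(stringList):
--     return any(stringList.count(s) >= 3 for s in stringList)
-- ===== Notes on version B (the rewrite author's own statement) =====
-- stated objective: simpler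
-- what changed: Drops the dictionary entirely: a one-line brute-force scan that asks, for each element, whether its total count in the list reaches 3, instead of A's count-into-a-dict pass followed by a second scan over the dict keys.
import Mathlib
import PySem

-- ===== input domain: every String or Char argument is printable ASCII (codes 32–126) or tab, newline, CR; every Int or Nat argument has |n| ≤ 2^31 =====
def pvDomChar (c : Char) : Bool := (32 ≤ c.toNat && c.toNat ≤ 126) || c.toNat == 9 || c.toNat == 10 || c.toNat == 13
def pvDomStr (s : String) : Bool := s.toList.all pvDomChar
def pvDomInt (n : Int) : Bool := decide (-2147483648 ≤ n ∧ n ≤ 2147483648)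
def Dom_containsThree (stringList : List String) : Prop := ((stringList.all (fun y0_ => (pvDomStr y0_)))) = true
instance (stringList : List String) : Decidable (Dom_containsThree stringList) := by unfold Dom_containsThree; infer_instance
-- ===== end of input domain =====

-- B drops A's dictionary entirely: a one-line brute-force scan asking whether any element's total count in the list reaches 3 (simpler; not faster).


-- ===== PORT A =====
-- first loop: build the count dictionary (branching on membership exactly as A does)
-- second loop over dictionary.keys() with early return = List.any over the keys
def containsThree (stringList : List String) : Bool :=
  let dictionary : PySem.Dict String Int := stringList.foldl
    (fun d s => if d.contains s then d.insert s (d.getD s 0 + 1) else d.insert s 1)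
    PySem.Dict.empty
  dictionary.keys.any (fun s => dictionary.getD s 0 ≥ 3)

-- ===== PORT B =====
-- any(stringList.count(s) >= 3 for s in stringList)
def containsThree_alt (stringList : List String) : Bool :=
  stringList.any (fun s => PySem.List.count stringList s ≥ 3)

-- ===== PRECONDITION & SPEC =====
def Spec_containsThree (stringList : List String) (out : Bool) : Prop := out = containsThree_alt stringList
instance (stringList : List String) (out : Bool) : Decidable (Spec_containsThree stringList out) := by unfold Spec_containsThree; infer_instance

-- ===== CLAIM (what is proved, stated in full; the proofs are below) =====
def Claim_equal_containsThree : Prop := ∀ (stringList : List String), Dom_containsThree stringList → Spec_containsThree stringList (containsThree stringList)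

-- ===== LEMMAS AND PROOFS =====

-- A's counting loop is the standard counter loop (the membership branch is redundant)
theorem foldA_eq_counter (l : List String) :
    l.foldl (fun d s => if d.contains s then d.insert s (d.getD s 0 + 1) else d.insert s 1)
      PySem.Dict.empty = PySem.Dict.counter l := by
  rw [← PySem.Dict.foldl_insert_getD_add_one_eq_counter]
  congr 1
  funext d s
  by_cases h : d.contains s = true
  · simp [h]
  · simp only [Bool.not_eq_true] at h
    simp [h, PySem.Dict.getD_of_not_contains _ _ h]

-- A returns true iff some element occurs ≥ 3 times
theorem containsThree_iff (l : List String) :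
    containsThree l = true ↔ ∃ s ∈ l, 3 ≤ (l.count s : Int) := by
  simp only [containsThree, List.any_eq_true, decide_eq_true_eq, ge_iff_le]
  rw [foldA_eq_counter]
  simp only [PySem.Dict.keys_counter, PySem.Dict.getD_counter, PySem.Set.mem_ofList]

-- B returns true iff some element occurs ≥ 3 times
theorem containsThree_alt_iff (l : List String) :
    containsThree_alt l = true ↔ ∃ s ∈ l, 3 ≤ (l.count s : Int) := by
  simp only [containsThree_alt, List.any_eq_true, decide_eq_true_eq, ge_iff_le,
    PySem.List.count_eq]
  constructor <;> rintro ⟨s, hs, h⟩ <;> exact ⟨s, hs, by exact_mod_cast h⟩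

-- ===== VERDICT (by name: the statement is the Claim_ definition above) =====
theorem containsThree_spec : Claim_equal_containsThree := by
  intro l _
  unfold Spec_containsThree
  rcases hB : containsThree_alt l with _ | _
  · rcases hA : containsThree l with _ | _
    · rfl
    · exact absurd ((containsThree_alt_iff l).mpr ((containsThree_iff l).mp hA)) (by simp [hB])
  · exact (containsThree_iff l).mpr ((containsThree_alt_iff l).mp hB) |>.symm ▸ rfl
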